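-- pv_equiv track=rewrite | github.com/alex1770/Covid-19 | excessdeaths_rcASMR.py | age_s2i
-- ===== SOURCE A (Python) =====
-- def age_s2i(s):
--   assert s[0]=='Y'
--   if s=='Y_LT1' or s=='Y_LT5': return 0
--   i=0
--   while i<len(s) and not s[i].isdigit(): i+=1
--   j=i
--   while j<len(s) and s[j].isdigit(): j+=1
--   return min(int(s[i:j])//5,18)
-- ===== SOURCE B (Python) =====
-- def age_s2i(s):
--   assert s[0]=='Y'
--   if s=='Y_LT1' or s=='Y_LT5': return 0
--   n=None
--   for c in s:
--     if c.isdigit():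
--       n=(n or 0)*10+int(c)
--     elif n is not None:
--       break
--   if n is None: raise ValueError("no digits in age band: "+s)
--   return min(n//5,18)
-- ===== Notes on version B (the rewrite author's own statement) =====
-- stated objective: alternative
-- what changed: replaces the two index-scanning while loops plus slice-and-int() with a single pass over the characters that accumulates the value of the first digit run arithmetically and breaks at its end
-- outside the precondition, e.g. on age_s2i('Y'): A raises ValueError, B raises ValueError; on age_s2i(''): A raises IndexError, B raises IndexError
import Mathlib
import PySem

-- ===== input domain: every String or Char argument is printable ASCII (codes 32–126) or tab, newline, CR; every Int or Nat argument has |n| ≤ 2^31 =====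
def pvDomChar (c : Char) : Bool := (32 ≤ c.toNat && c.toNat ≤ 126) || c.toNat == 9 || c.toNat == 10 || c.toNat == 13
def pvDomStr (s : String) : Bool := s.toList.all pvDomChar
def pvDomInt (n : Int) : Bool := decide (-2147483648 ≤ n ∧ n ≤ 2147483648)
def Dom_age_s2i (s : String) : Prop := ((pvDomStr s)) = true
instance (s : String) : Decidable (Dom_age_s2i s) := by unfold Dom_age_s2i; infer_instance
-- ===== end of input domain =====

-- B replaces A's two index-scanning while loops + slice + int() with a single pass that
-- accumulates the value of the first digit run arithmetically (objective: alternative).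

-- ===== PORT A =====
-- int(t) for t = s[i:j]: ported by hand as a pure-digit parser; exact at this call site,
-- where the argument is always a (possibly empty) run of '0'-'9' ('' → ValueError → none).
def pvDigitsInt? (ds : List Char) : Option Int :=
  if ds = [] then none
  else ds.foldl (fun acc? c =>
    acc?.bind (fun a =>
      if PySem.Chars.isdigit c then some (a * 10 + ((c.toNat : Int) - 48)) else none))
    (some 0)

-- while i<len(s) and not s[i].isdigit(): i+=1   (structural recursion on the suffix at i)
def pvWhileNotDigit : List Char → Nat → Nat
  | [], i => i
  | c :: rest, i => if ¬ PySem.Chars.isdigit c then pvWhileNotDigit rest (i + 1) else i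

-- while j<len(s) and s[j].isdigit(): j+=1   (structural recursion on the suffix at j)
def pvWhileDigit : List Char → Nat → Nat
  | [], j => j
  | c :: rest, j => if PySem.Chars.isdigit c then pvWhileDigit rest (j + 1) else j

def age_s2i (s : String) : Int :=
  match PySem.List.pyGet? s.toList 0 with
  | none => 0        -- s[0] raises IndexError (excluded by Pre_)
  | some c0 =>
    if c0 ≠ 'Y' then 0   -- assert fails: AssertionError (excluded by Pre_)
    else if s = "Y_LT1" ∨ s = "Y_LT5" then 0
    else
      let cs := s.toList
      let i := pvWhileNotDigit cs 0
      let j := pvWhileDigit (cs.drop i) i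
      min (PySem.Int.floordiv
        ((pvDigitsInt? (PySem.List.slice cs (some (i : Int)) (some (j : Int)))).getD 0) 5) 18

-- ===== PORT B =====
-- the single for-loop of Source B: n is None until the first digit; break after the run ends
def pvScan : List Char → Option Int → Option Int
  | [], n => n
  | c :: rest, n =>
    if PySem.Chars.isdigit c then
      pvScan rest (some ((n.getD 0) * 10 + ((c.toNat : Int) - 48)))
    else
      match n with
      | some _ => n          -- break
      | none => pvScan rest none

def age_s2i_alt (s : String) : Int :=
  match PySem.List.pyGet? s.toList 0 with
  | none => 0        -- s[0] raises IndexError (excluded by Pre_)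
  | some c0 =>
    if c0 ≠ 'Y' then 0   -- assert fails: AssertionError (excluded by Pre_)
    else if s = "Y_LT1" ∨ s = "Y_LT5" then 0
    else
      match pvScan s.toList none with
      | none => 0          -- no digits: raise ValueError (excluded by Pre_)
      | some n => min (PySem.Int.floordiv n 5) 18

-- ===== PRECONDITION & SPEC =====
-- Pre_ : exactly the inputs on which A returns: first char 'Y' (else IndexError /
-- AssertionError) and, unless s is one of the two special strings, some digit in s
-- (else int('') raises ValueError).
def Pre_age_s2i (s : String) : Prop :=
  s.toList.head? = some 'Y' ∧
    (s = "Y_LT1" ∨ s = "Y_LT5" ∨ s.toList.any PySem.Chars.isdigit = true)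
instance (s : String) : Decidable (Pre_age_s2i s) := by unfold Pre_age_s2i; infer_instance

def pvWitness_age_s2i : String := "Y70-74"

def Spec_age_s2i (s : String) (out : Int) : Prop := out = age_s2i_alt s
instance (s : String) (out : Int) : Decidable (Spec_age_s2i s out) := by unfold Spec_age_s2i; infer_instance

-- ===== CLAIM (what is proved, stated in full; the proofs are below) =====
def Claim_equal_age_s2i : Prop :=
  ∀ (s : String), Dom_age_s2i s → Pre_age_s2i s → Spec_age_s2i s (age_s2i s)

-- ===== LEMMAS AND PROOFS =====

theorem pvWhileNotDigit_eq (cs : List Char) (i : Nat) :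
    pvWhileNotDigit cs i = i + (cs.takeWhile (fun c => !PySem.Chars.isdigit c)).length := by
  induction cs generalizing i with
  | nil => simp [pvWhileNotDigit]
  | cons c rest ih =>
    by_cases h : PySem.Chars.isdigit c
    · simp [pvWhileNotDigit, h, List.takeWhile_cons]
    · simp [pvWhileNotDigit, h, List.takeWhile_cons, ih]
      omega

theorem pvWhileDigit_eq (cs : List Char) (j : Nat) :
    pvWhileDigit cs j = j + (cs.takeWhile (fun c => PySem.Chars.isdigit c)).length := by
  induction cs generalizing j with
  | nil => simp [pvWhileDigit]
  | cons c rest ih =>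
    by_cases h : PySem.Chars.isdigit c
    · simp [pvWhileDigit, h, List.takeWhile_cons, ih]
      omega
    · simp [pvWhileDigit, h, List.takeWhile_cons]

theorem pv_drop_takeWhile_length {α : Type} (p : α → Bool) (cs : List α) :
    cs.drop (cs.takeWhile p).length = cs.dropWhile p := by
  induction cs with
  | nil => simp
  | cons c rest ih =>
    by_cases h : p c
    · simp [List.takeWhile_cons, List.dropWhile_cons, h, ih]
    · simp [List.takeWhile_cons, List.dropWhile_cons, h]

theorem pv_take_takeWhile_length {α : Type} (p : α → Bool) (cs : List α) :
    cs.take (cs.takeWhile p).length = cs.takeWhile p := by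
  induction cs with
  | nil => simp
  | cons c rest ih =>
    by_cases h : p c
    · simp [List.takeWhile_cons, h, ih]
    · simp [List.takeWhile_cons, h]

theorem pvScan_skip (cs : List Char) :
    pvScan cs none = pvScan (cs.dropWhile (fun c => !PySem.Chars.isdigit c)) none := by
  induction cs with
  | nil => simp
  | cons c rest ih =>
    by_cases h : PySem.Chars.isdigit c
    · simp [List.dropWhile_cons, h]
    · simpa [pvScan, List.dropWhile_cons, h] using ih

theorem pvScan_run (ds : List Char) (a : Int) :
    pvScan ds (some a) =
      some ((ds.takeWhile (fun c => PySem.Chars.isdigit c)).foldl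
        (fun m c => m * 10 + ((c.toNat : Int) - 48)) a) := by
  induction ds generalizing a with
  | nil => simp [pvScan]
  | cons c rest ih =>
    by_cases h : PySem.Chars.isdigit c
    · simp [pvScan, h, ih]
    · simp [pvScan, h]

theorem pvDigitsInt?_all_digits (ds : List Char) (a : Int)
    (h : ∀ c ∈ ds, PySem.Chars.isdigit c = true) :
    ds.foldl (fun acc? c =>
        acc?.bind (fun b =>
          if PySem.Chars.isdigit c then some (b * 10 + ((c.toNat : Int) - 48)) else none))
      (some a)
      = some (ds.foldl (fun m c => m * 10 + ((c.toNat : Int) - 48)) a) := by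
  induction ds generalizing a with
  | nil => simp
  | cons c rest ih =>
    have hc : PySem.Chars.isdigit c = true := h c (List.mem_cons_self ..)
    simp only [List.foldl_cons, Option.bind_some, hc, if_pos]
    exact ih _ (fun x hx => h x (List.mem_cons_of_mem _ hx))

-- ===== VERDICT (by name: the statement is the Claim_ definition above) =====
theorem age_s2i_spec : Claim_equal_age_s2i := by
  intro s _ hpre
  obtain ⟨h0, hrest⟩ := hpre
  unfold Spec_age_s2i age_s2i age_s2i_alt
  have hget : PySem.List.pyGet? s.toList 0 = some 'Y' := by
    rw [PySem.List.pyGet?_zero, ← List.head?_eq_getElem?]; exact h0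
  rw [hget]
  simp only [ne_eq, not_true_eq_false, if_false, if_neg]
  by_cases hsp : s = "Y_LT1" ∨ s = "Y_LT5"
  · simp [hsp]
  · simp only [hsp, if_false]
    have hdig : s.toList.any PySem.Chars.isdigit = true := by tauto
    -- abbreviations
    set cs := s.toList with hcs
    set p : Char → Bool := fun c => PySem.Chars.isdigit c with hp
    set q : Char → Bool := fun c => !PySem.Chars.isdigit c with hq
    have hi : pvWhileNotDigit cs 0 = (cs.takeWhile q).length := by
      simpa using pvWhileNotDigit_eq cs 0
    set i := pvWhileNotDigit cs 0 with hidef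
    have hdrop : cs.drop i = cs.dropWhile q := by
      rw [hi]; exact pv_drop_takeWhile_length q cs
    have hj : pvWhileDigit (cs.drop i) i = i + ((cs.dropWhile q).takeWhile p).length := by
      rw [hdrop]; exact pvWhileDigit_eq _ i
    -- the dropWhile suffix is nonempty and starts with a digit
    have hds : cs.dropWhile q ≠ [] := by
      intro hnil
      rw [List.dropWhile_eq_nil_iff] at hnil
      rw [List.any_eq_true] at hdig
      obtain ⟨c, hc, hcd⟩ := hdig
      have := hnil c hc
      simp [hq, hcd] at this
    obtain ⟨d, rest, hcons⟩ := List.exists_cons_of_ne_nil hds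
    have hd : p d = true := by
      have hqd : q d = false := by
        have := List.head?_dropWhile_not q cs
        rw [hcons] at this
        simpa using this
      simp only [hq, Bool.not_eq_false'] at hqd
      simpa [hp] using hqd
    -- the slice is the first maximal digit run
    have hslice : PySem.List.slice cs (some (i : Int)) (some ((pvWhileDigit (cs.drop i) i : Nat) : Int))
        = (cs.dropWhile q).takeWhile p := by
      rw [hj]
      rw [PySem.List.slice_natCast]
      have : i + ((cs.dropWhile q).takeWhile p).length - i = ((cs.dropWhile q).takeWhile p).length := by omega
      rw [this, hdrop]
      exact pv_take_takeWhile_length p _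
    rw [hslice]
    -- evaluate both sides on the run
    have hrun_cons : (cs.dropWhile q).takeWhile p = d :: rest.takeWhile p := by
      rw [hcons, List.takeWhile_cons, if_pos hd]
    have hA : pvDigitsInt? ((cs.dropWhile q).takeWhile p)
        = some ((rest.takeWhile p).foldl (fun m c => m * 10 + ((c.toNat : Int) - 48))
            (0 * 10 + ((d.toNat : Int) - 48))) := by
      rw [hrun_cons]
      unfold pvDigitsInt?
      rw [if_neg (by simp)]
      have hall : ∀ c ∈ d :: rest.takeWhile p, PySem.Chars.isdigit c = true := by
        intro c hc
        rcases List.mem_cons.mp hc with h1 | h1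
        · subst h1; simpa [hp] using hd
        · have := List.mem_takeWhile_imp h1
          simpa [hp] using this
      rw [pvDigitsInt?_all_digits _ _ hall]
      simp
    have hB : pvScan cs none
        = some ((rest.takeWhile p).foldl (fun m c => m * 10 + ((c.toNat : Int) - 48))
            (0 * 10 + ((d.toNat : Int) - 48))) := by
      rw [pvScan_skip, hcons]
      have hd' : PySem.Chars.isdigit d = true := by simpa [hp] using hd
      simp only [pvScan, hd', if_pos, Option.getD_none]
      exact pvScan_run rest _
    rw [hA, hB]
    simp
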